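-- pv_equiv track=rewrite | github.com/alecsandraiordache/BioInformatics | Project_L6/ex2/ex2.py | digest_ecori
-- ===== SOURCE A (Python) =====
-- def digest_ecori(seq):
--     motif = "GAATTC"
--     cut_offset = 1
--     cut_sites = []
--     i = 0
--     while True:
--         j = seq.find(motif, i)
--         if j == -1:
--             break
--         cut_sites.append(j + cut_offset)
--         i = j + 1
--     if not cut_sites:
--         return [len(seq)]
--     positions = [0] + cut_sites + [len(seq)]
--     fragments = [positions[k+1] - positions[k] for k in range(len(positions)-1)]
--     return [f for f in fragments if f > 0]
-- ===== SOURCE B (Python) =====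
-- def digest_ecori(seq):
--     parts = seq.split("GAATTC")
--     if len(parts) == 1:
--         return [len(seq)]
--     return [len(parts[0]) + 1] + [len(p) + 6 for p in parts[1:-1]] + [len(parts[-1]) + 5]
-- ===== Notes on version B (the rewrite author's own statement) =====
-- stated objective: simpler
-- what changed: Replaces the find-loop that collects cut positions plus the positions-difference-and-filter pipeline with a single str.split on the 6-letter motif followed by direct arithmetic on the part lengths (+1 first, +6 interior, +5 last).
import Mathlib
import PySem

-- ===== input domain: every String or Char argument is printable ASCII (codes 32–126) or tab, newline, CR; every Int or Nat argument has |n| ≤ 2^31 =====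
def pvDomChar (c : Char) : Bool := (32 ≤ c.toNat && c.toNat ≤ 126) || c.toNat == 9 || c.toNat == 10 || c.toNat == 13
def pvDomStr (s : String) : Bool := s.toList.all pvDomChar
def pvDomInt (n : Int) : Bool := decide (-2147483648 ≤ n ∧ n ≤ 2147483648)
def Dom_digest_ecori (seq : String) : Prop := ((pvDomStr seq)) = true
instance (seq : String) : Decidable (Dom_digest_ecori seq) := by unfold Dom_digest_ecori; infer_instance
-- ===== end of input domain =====

-- B replaces A's find-loop over cut positions plus the position-difference-and-filter pipeline
-- with one split on "GAATTC" and direct arithmetic on the part lengths (simpler decomposition).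

-- ===== PORT A =====
def pvMotif : List Char := "GAATTC".toList

-- the 'while True: j = seq.find(motif, i) …' loop, collecting cut sites j + 1
def pvCutsA (s : List Char) (i : Nat) (h : i ≤ s.length) : List Int :=
  let j := PySem.Chars.findFrom s pvMotif (i : Int)
  if hj : j = -1 then []
  else
    have hsp := PySem.Chars.findFrom_natCast_spec s pvMotif i h hj
    have hlen : j.toNat + 6 ≤ s.length := by
      have hp := hsp.2.1.length_le
      rw [List.length_drop] at hp
      have hm : pvMotif.length = 6 := by decide
      omega
    have hij : i ≤ j.toNat := by
      have h1 := hsp.1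
      have h0 : (0 : Int) ≤ (i : Int) := Int.natCast_nonneg i
      omega
    (j + 1) :: pvCutsA s (j.toNat + 1) (by omega)
termination_by s.length - i
decreasing_by omega

def digest_ecori (seq : String) : List Int :=
  let s := seq.toList
  let cut_sites := pvCutsA s 0 (Nat.zero_le _)
  if cut_sites = [] then [(s.length : Int)]
  else
    let positions := [(0 : Int)] ++ cut_sites ++ [(s.length : Int)]
    let fragments := (List.range (positions.length - 1)).map
      (fun k => positions.getD (k + 1) 0 - positions.getD k 0)
    fragments.filter (fun f => decide (0 < f))

-- ===== PORT B =====
def digest_ecori_alt (seq : String) : List Int :=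
  let parts := PySem.Chars.splitOn seq.toList "GAATTC".toList
  if parts.length = 1 then [(seq.toList.length : Int)]
  else
    [(parts.headI.length : Int) + 1]
      ++ (PySem.List.slice parts (some 1) (some (-1))).map (fun p => (p.length : Int) + 6)
      ++ [(parts.getLastI.length : Int) + 5]

-- ===== PRECONDITION & SPEC =====
def Spec_digest_ecori (seq : String) (out : List Int) : Prop := out = digest_ecori_alt seq
instance (seq : String) (out : List Int) : Decidable (Spec_digest_ecori seq out) := by unfold Spec_digest_ecori; infer_instance

-- ===== CLAIM (what is proved, stated in full; the proofs are below) =====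
def Claim_equal_digest_ecori : Prop := ∀ (seq : String), Dom_digest_ecori seq → Spec_digest_ecori seq (digest_ecori seq)

-- ===== LEMMAS AND PROOFS =====

-- first occurrence of the motif, as a structurally recursive Option Nat
def ffind (s : List Char) : Option Nat :=
  match s with
  | [] => none
  | c :: rest => if pvMotif.isPrefixOf (c :: rest) then some 0 else (ffind rest).map (· + 1)

theorem pvMotif_eq : pvMotif = ['G', 'A', 'A', 'T', 'T', 'C'] := by decide

theorem find_go_eq (s : List Char) (k : Nat) :
    PySem.Chars.find.go pvMotif s k =
      match ffind s with | none => -1 | some n => ((k + n : Nat) : Int) := by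
  induction s generalizing k with
  | nil => simp [PySem.Chars.find.go, ffind, pvMotif]
  | cons c rest ih =>
    rw [PySem.Chars.find.go, ffind]
    by_cases hp : pvMotif.isPrefixOf (c :: rest)
    · simp [hp]
    · simp only [hp, ih]
      cases ffind rest with
      | none => simp
      | some n => simp; ring

theorem find_eq (s : List Char) :
    PySem.Chars.find s pvMotif = match ffind s with | none => -1 | some n => (n : Int) := by
  rw [PySem.Chars.find, find_go_eq]
  cases ffind s <;> simp

theorem ffind_prefix {s : List Char} {f : Nat} (h : ffind s = some f) :
    pvMotif <+: s.drop f := by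
  induction s generalizing f with
  | nil => simp [ffind] at h
  | cons c rest ih =>
    rw [ffind] at h
    by_cases hp : pvMotif.isPrefixOf (c :: rest)
    · simp [hp] at h
      subst h
      simpa using List.isPrefixOf_iff_prefix.mp hp
    · simp [hp] at h
      obtain ⟨g, hg, rfl⟩ := h
      simpa using ih hg

theorem ffind_le {s : List Char} {f : Nat} (h : ffind s = some f) :
    f + 6 ≤ s.length := by
  have hp := (ffind_prefix h).length_le
  simp [pvMotif, List.length_drop] at hp
  omega

-- canonical fragment list: A's loop-and-difference result and B's split-and-add result both equal this
def canonFrag (s : List Char) : List Int :=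
  match hf : ffind s with
  | none => [(s.length : Int)]
  | some f => ((f : Int) + 1) :: canonFrag (s.drop (f + 1))
termination_by s.length
decreasing_by
  have := ffind_le hf
  simp [List.length_drop]; omega

def canonSplit (s : List Char) : List (List Char) :=
  match hf : ffind s with
  | none => [s]
  | some f => s.take f :: canonSplit (s.drop (f + 6))
termination_by s.length
decreasing_by
  have := ffind_le hf
  simp [List.length_drop]; omega

def canonCutsAbs (s : List Char) (i : Nat) : List Int :=
  match hf : ffind (s.drop i) with
  | none => []
  | some f => ((i + f + 1 : Nat) : Int) :: canonCutsAbs s (i + f + 1)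
termination_by s.length - i
decreasing_by
  have := ffind_le hf
  simp [List.length_drop] at this
  omega


theorem canonFrag_none {t : List Char} (h : ffind t = none) :
    canonFrag t = [(t.length : Int)] := by
  rw [canonFrag.eq_def, h]

theorem canonFrag_some {t : List Char} {g : Nat} (h : ffind t = some g) :
    canonFrag t = ((g : Int) + 1) :: canonFrag (t.drop (g + 1)) := by
  rw [canonFrag.eq_def, h]

theorem canonSplit_none {t : List Char} (h : ffind t = none) :
    canonSplit t = [t] := by
  rw [canonSplit.eq_def, h]

theorem canonSplit_some {t : List Char} {g : Nat} (h : ffind t = some g) :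
    canonSplit t = t.take g :: canonSplit (t.drop (g + 6)) := by
  rw [canonSplit.eq_def, h]

theorem findFrom_eq_ffind (s : List Char) (i : Nat) (h : i ≤ s.length) :
    PySem.Chars.findFrom s pvMotif (i : Int) =
      match ffind (s.drop i) with | none => -1 | some f => ((i + f : Nat) : Int) := by
  rw [PySem.Chars.findFrom_natCast s pvMotif i h, find_eq]
  cases ffind (s.drop i) with
  | none => simp
  | some f => simp

theorem pvCutsA_eq (s : List Char) (i : Nat) (h : i ≤ s.length) :
    pvCutsA s i h = canonCutsAbs s i := by
  induction i, h using pvCutsA.induct with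
  | case1 i h j hj =>
    have hE := findFrom_eq_ffind s i h
    rw [pvCutsA, canonCutsAbs.eq_def]
    cases hf : ffind (s.drop i) with
    | none => rw [hf] at hE; simp [hE]
    | some f =>
      rw [hf] at hE
      have hE' : PySem.Chars.findFrom s pvMotif (i : Int) = ((i + f : Nat) : Int) := hE
      rw [show (j : Int) = PySem.Chars.findFrom s pvMotif (i : Int) from rfl, hE'] at hj
      exfalso; omega
  | case2 i h j hne hsp hlen hij ih =>
    have hE := findFrom_eq_ffind s i h
    rw [pvCutsA, canonCutsAbs.eq_def]
    cases hf : ffind (s.drop i) with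
    | none => rw [hf] at hE; exact absurd hE hne
    | some f =>
      rw [hf] at hE
      have hE' : PySem.Chars.findFrom s pvMotif (i : Int) = ((i + f : Nat) : Int) := hE
      have hj2 : j.toNat = i + f := by
        rw [show (j : Int) = PySem.Chars.findFrom s pvMotif (i : Int) from rfl, hE']
        omega
      have hne' : ¬ PySem.Chars.findFrom s pvMotif (i : Int) = -1 := hne
      rw [dif_neg hne']
      refine congrArg₂ List.cons ?_ ?_
      · rw [hE']; push_cast; ring
      · rw [ih, hj2]

-- the motif cannot occur inside its own tail: scanning past 'AATTC' finds nothing new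
theorem ffind_not_G {c : Char} (l : List Char) (hc : c ≠ 'G') :
    ffind (c :: l) = (ffind l).map (· + 1) := by
  have hp : pvMotif.isPrefixOf (c :: l) = false := by
    rw [pvMotif_eq]
    simp [List.isPrefixOf]
    intro h
    exact absurd h.symm hc
  rw [ffind, hp]
  simp

theorem ffind_AATTC (u : List Char) :
    ffind (['A', 'A', 'T', 'T', 'C'] ++ u) = (ffind u).map (· + 5) := by
  simp only [List.cons_append, List.nil_append]
  rw [ffind_not_G _ (by decide), ffind_not_G _ (by decide), ffind_not_G _ (by decide),
      ffind_not_G _ (by decide), ffind_not_G _ (by decide)]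
  cases ffind u <;> simp

theorem drop_of_prefix {s : List Char} {g : Nat} (hp : pvMotif <+: s.drop g) :
    s.drop (g + 1) = ['A', 'A', 'T', 'T', 'C'] ++ s.drop (g + 6) := by
  obtain ⟨u, hu⟩ := hp
  rw [pvMotif_eq] at hu
  have h1 : s.drop (g + 1) = (s.drop g).drop 1 := by
    rw [List.drop_drop]
  have h6 : s.drop (g + 6) = (s.drop g).drop 6 := by
    rw [List.drop_drop]
  rw [h1, h6, ← hu]
  simp

def pairDiffs (l : List Int) : List Int :=
  match l with
  | a :: b :: t => (b - a) :: pairDiffs (b :: t)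
  | _ => []

theorem range_map_eq_pairDiffs (l : List Int) :
    (List.range (l.length - 1)).map (fun k => l.getD (k + 1) 0 - l.getD k 0) = pairDiffs l := by
  induction l using pairDiffs.induct with
  | case1 a b t ih =>
    rw [pairDiffs]
    have hlen : (a :: b :: t).length - 1 = ((b :: t).length - 1) + 1 := by simp
    rw [hlen, List.range_succ_eq_map, List.map_cons, List.map_map]
    refine congrArg₂ List.cons (by simp) ?_
    rw [← ih]
    apply List.map_congr_left
    intro k _
    simp [Nat.succ_eq_add_one]
  | case2 l hl =>
    rcases l with _ | ⟨a, _ | ⟨b, t⟩⟩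
    · simp [pairDiffs]
    · simp [pairDiffs]
    · exact absurd rfl (fun hh => hl a b t hh)

theorem frag_abs (s : List Char) : ∀ (i : Nat), i ≤ s.length →
    pairDiffs ((i : Int) :: canonCutsAbs s i ++ [(s.length : Int)]) = canonFrag (s.drop i) := by
  intro i
  induction i using canonCutsAbs.induct s with
  | case1 i hf =>
    intro h
    rw [canonCutsAbs.eq_def, hf, canonFrag.eq_def, hf]
    simp [pairDiffs, List.length_drop]
    omega
  | case2 i f hf ih =>
    intro h
    have hle := ffind_le hf
    rw [List.length_drop] at hle
    rw [canonCutsAbs.eq_def, hf, canonFrag.eq_def, hf]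
    simp only [List.cons_append, pairDiffs]
    refine congrArg₂ List.cons (by push_cast; ring) ?_
    have ih' := ih (by omega)
    rw [List.cons_append] at ih'
    rw [ih', List.drop_drop, Nat.add_assoc]

theorem canonFrag_pos (s : List Char) (h : 1 ≤ s.length) :
    ∀ x ∈ canonFrag s, 0 < x := by
  induction s using canonFrag.induct with
  | case1 s hf =>
    rw [canonFrag.eq_def, hf]
    intro x hx
    simp at hx
    subst hx
    exact_mod_cast h
  | case2 s f hf ih =>
    rw [canonFrag.eq_def, hf]
    intro x hx
    have hle := ffind_le hf
    rcases List.mem_cons.mp hx with h1 | h1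
    · subst h1; positivity
    · exact ih (by simp [List.length_drop]; omega) x h1

theorem A_eq (seq : String) : digest_ecori seq = canonFrag seq.toList := by
  simp only [digest_ecori]
  rw [pvCutsA_eq]
  cases hf : ffind seq.toList with
  | none =>
    have hc : canonCutsAbs seq.toList 0 = [] := by
      rw [canonCutsAbs.eq_def, List.drop_zero, hf]
    rw [hc, if_pos rfl, canonFrag_none hf]
  | some f =>
    have hc : canonCutsAbs seq.toList 0 = ((0 + f + 1 : Nat) : Int) :: canonCutsAbs seq.toList (0 + f + 1) := by
      rw [canonCutsAbs.eq_def, List.drop_zero, hf]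
    have hlen := ffind_le hf
    rw [if_neg (by rw [hc]; simp)]
    rw [range_map_eq_pairDiffs]
    have h0 := frag_abs seq.toList 0 (Nat.zero_le _)
    rw [List.drop_zero] at h0
    rw [show ((0 : Nat) : Int) = (0 : Int) from rfl] at h0
    rw [List.singleton_append, h0]
    apply List.filter_eq_self.mpr
    intro a ha
    simpa using canonFrag_pos seq.toList (by omega) a ha

theorem modifyHead_nil_append (l : List (List Char)) :
    l.modifyHead (fun a => ([] : List Char) ++ a) = l := by
  cases l <;> simp

theorem canonSplit_ne_nil (s : List Char) : canonSplit s ≠ [] := by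
  rw [canonSplit.eq_def]
  cases hf : ffind s <;> simp

theorem splitOn_go_eq (fuel : Nat) (s cur : List Char) (acc : List (List Char))
    (h : s.length ≤ fuel) :
    PySem.Chars.splitOn.go pvMotif fuel s cur acc =
      acc.reverse ++ (canonSplit s).modifyHead (fun p => cur.reverse ++ p) := by
  induction fuel generalizing s cur acc with
  | zero =>
    have hs : s = [] := List.length_eq_zero_iff.mp (Nat.le_zero.mp h)
    subst hs
    rw [PySem.Chars.splitOn.go, canonSplit.eq_def]
    simp [ffind]
  | succ fuel ih =>
    cases s with
    | nil =>
      rw [PySem.Chars.splitOn.go, canonSplit.eq_def] <;> simp [ffind]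
    | cons c rest =>
      rw [PySem.Chars.splitOn.go]
      by_cases hp : pvMotif.isPrefixOf (c :: rest)
      · rw [if_pos hp]
        have hm : pvMotif.length = 6 := by decide
        have hff : ffind (c :: rest) = some 0 := by rw [ffind, if_pos hp]
        rw [ih _ _ _ (by rw [List.length_drop, hm]; simp at h ⊢; omega)]
        conv_rhs => rw [canonSplit_some hff]
        simp [hm]
        exact modifyHead_nil_append _
      · rw [if_neg hp]
        rw [ih _ _ _ (by simp at h; omega)]
        cases hr : ffind rest with
        | none =>
          have hff : ffind (c :: rest) = none := by rw [ffind, if_neg hp, hr]; rfl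
          conv_lhs => rw [canonSplit_none hr]
          conv_rhs => rw [canonSplit_none hff]
          simp
        | some g =>
          have hff : ffind (c :: rest) = some (g + 1) := by rw [ffind, if_neg hp, hr]; rfl
          conv_lhs => rw [canonSplit_some hr]
          conv_rhs => rw [canonSplit_some hff]
          have h1 : (c :: rest).take (g + 1) = c :: rest.take g := rfl
          have h2 : (c :: rest).drop (g + 1 + 6) = rest.drop (g + 6) := rfl
          rw [h1, h2]
          simp

theorem splitOn_eq_canonSplit (s : List Char) :
    PySem.Chars.splitOn s pvMotif = canonSplit s := by
  rw [PySem.Chars.splitOn, splitOn_go_eq _ _ _ _ (by omega)]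
  simpa using modifyHead_nil_append (canonSplit s)

def tailAssemble (ps : List (List Char)) : List Int :=
  ps.dropLast.map (fun p => (p.length : Int) + 6) ++ [(ps.getLastI.length : Int) + 5]

theorem getLastI_cons_of_ne_nil {a : List Char} {ps : List (List Char)} (h : ps ≠ []) :
    (a :: ps).getLastI = ps.getLastI := by
  cases ps with
  | nil => exact absurd rfl h
  | cons b t =>
    rw [List.getLastI_eq_getLast?_getD, List.getLastI_eq_getLast?_getD, List.getLast?_cons_cons]

theorem slice_one_neg_one {a : List Char} (l : List (List Char)) :
    PySem.List.slice (a :: l) (some 1) (some (-1)) = l.dropLast := by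
  simp [PySem.List.slice]
  exact List.dropLast_eq_take.symm

theorem tail_eq (t : List Char) :
    tailAssemble (canonSplit t) = canonFrag (['A', 'A', 'T', 'T', 'C'] ++ t) := by
  induction t using canonSplit.induct with
  | case1 t hf =>
    rw [canonSplit_none hf,
        canonFrag_none (show ffind (['A', 'A', 'T', 'T', 'C'] ++ t) = none by rw [ffind_AATTC, hf]; rfl)]
    simp [tailAssemble, List.getLastI]
    omega
  | case2 t g hf ih =>
    have hle := ffind_le hf
    have hpre := ffind_prefix hf
    rw [canonSplit_some hf]
    have hne := canonSplit_ne_nil (t.drop (g + 6))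
    rw [show tailAssemble (t.take g :: canonSplit (t.drop (g + 6))) =
        (((t.take g).length : Int) + 6) :: tailAssemble (canonSplit (t.drop (g + 6))) by
      unfold tailAssemble
      rw [List.dropLast_cons_of_ne_nil hne, getLastI_cons_of_ne_nil hne]
      simp]
    rw [ih,
        canonFrag_some (show ffind (['A', 'A', 'T', 'T', 'C'] ++ t) = some (g + 5) by rw [ffind_AATTC, hf]; rfl)]
    refine congrArg₂ List.cons ?_ ?_
    · rw [List.length_take]
      push_cast
      omega
    · have hd : (['A', 'A', 'T', 'T', 'C'] ++ t).drop (g + 5 + 1) = t.drop (g + 1) := by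
        rw [show g + 5 + 1 = 5 + (g + 1) by omega, List.drop_append]
        simp
      rw [hd, drop_of_prefix hpre]

theorem B_eq (seq : String) : digest_ecori_alt seq = canonFrag seq.toList := by
  rw [digest_ecori_alt]
  set s := seq.toList with hs
  rw [show "GAATTC".toList = pvMotif from rfl, splitOn_eq_canonSplit]
  cases hf : ffind s with
  | none =>
    rw [canonSplit_none hf, canonFrag_none hf]
    simp
  | some f =>
    have hlen := ffind_le hf
    have hpre := ffind_prefix hf
    rw [canonSplit_some hf]
    have hne := canonSplit_ne_nil (s.drop (f + 6))
    have hlen1 : (s.take f :: canonSplit (s.drop (f + 6))).length ≠ 1 := by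
      simp
      intro hnil
      exact hne hnil
    rw [if_neg hlen1]
    rw [slice_one_neg_one _, getLastI_cons_of_ne_nil hne]
    rw [canonFrag_some hf]
    refine congrArg₂ List.cons ?_ ?_
    · simp [List.length_take]
      omega
    · have htail : tailAssemble (canonSplit (s.drop (f + 6))) = canonFrag (s.drop (f + 1)) := by
        rw [tail_eq, ← drop_of_prefix hpre]
      exact htail

-- ===== VERDICT (by name: the statement is the Claim_ definition above) =====
theorem digest_ecori_spec : Claim_equal_digest_ecori := by
  intro seq _
  unfold Spec_digest_ecori
  rw [A_eq, B_eq]
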